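-- pv_equiv track=rewrite | github.com/nn0rty/kompegeEvgenyJobs--4variant | 25.py | F
-- ===== SOURCE A (Python) =====
-- def F(a):
--     b = [10,12,14,16,18]
--     pr = True
--     for m in b:
--         if a % m != 0:
--             pr = False
--     if pr == True:
--         return a, a // max(b)
-- ===== SOURCE B (Python) =====
-- def F(a):
--     # divisible by all of 10,12,14,16,18 iff divisible by lcm(10,12,14,16,18) = 5040
--     if a % 5040 == 0:
--         return a, a // 18
-- ===== Notes on version B (the rewrite author's own statement) =====
-- stated objective: simpler
-- what changed: Replaced the flag-setting loop over the divisor list (and max() scan) with a single closed-form divisibility test by the LCM 5040.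
import Mathlib
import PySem

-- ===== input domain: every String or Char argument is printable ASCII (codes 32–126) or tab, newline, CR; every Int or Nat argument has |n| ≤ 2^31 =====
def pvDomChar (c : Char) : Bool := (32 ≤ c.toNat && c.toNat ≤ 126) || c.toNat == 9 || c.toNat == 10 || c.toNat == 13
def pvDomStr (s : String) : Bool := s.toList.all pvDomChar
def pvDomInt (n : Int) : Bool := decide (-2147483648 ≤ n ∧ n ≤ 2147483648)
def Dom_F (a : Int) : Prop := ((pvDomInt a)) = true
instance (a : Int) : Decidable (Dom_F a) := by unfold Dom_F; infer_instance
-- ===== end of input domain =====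

-- B replaces A's flag loop over the divisor list with one divisibility test by the LCM 5040 (simpler).


-- ===== PORT A =====
def F (a : Int) : Option (Int × Int) :=
  let b : List Int := [10, 12, 14, 16, 18]
  let pr := b.foldl (fun pr m => if PySem.Int.mod a m ≠ 0 then false else pr) true
  if pr = true then
    -- max(b): the list literal is nonempty, so the .getD 0 default is never used
    some (a, PySem.Int.floordiv a ((PySem.List.max? b (fun x => x)).getD 0))
  else none

-- ===== PORT B =====
def F_alt (a : Int) : Option (Int × Int) :=
  if PySem.Int.mod a 5040 = 0 then some (a, PySem.Int.floordiv a 18) else none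

-- ===== PRECONDITION & SPEC =====
def Spec_F (a : Int) (out : Option (Int × Int)) : Prop := out = F_alt a
instance (a : Int) (out : Option (Int × Int)) : Decidable (Spec_F a out) := by unfold Spec_F; infer_instance

-- ===== CLAIM (what is proved, stated in full; the proofs are below) =====
def Claim_equal_F : Prop := ∀ (a : Int), Dom_F a → Spec_F a (F a)

-- ===== LEMMAS AND PROOFS =====
-- key arithmetic fact: divisibility by 10,12,14,16,18 together is divisibility by their lcm 5040
theorem dvd_5040_of (a : Int) (h10 : (10:Int) ∣ a) (h14 : (14:Int) ∣ a)
    (h16 : (16:Int) ∣ a) (h18 : (18:Int) ∣ a) : (5040:Int) ∣ a := by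
  have h5 : (5:Int) ∣ a := dvd_trans (by norm_num) h10
  have h7 : (7:Int) ∣ a := dvd_trans (by norm_num) h14
  have h9 : (9:Int) ∣ a := dvd_trans (by norm_num) h18
  have c97 : IsCoprime (9:Int) 7 := Int.isCoprime_iff_gcd_eq_one.mpr (by decide)
  have h63 : (63:Int) ∣ a := by have := c97.mul_dvd h9 h7; norm_num at this; exact this
  have c635 : IsCoprime (63:Int) 5 := Int.isCoprime_iff_gcd_eq_one.mpr (by decide)
  have h315 : (315:Int) ∣ a := by have := c635.mul_dvd h63 h5; norm_num at this; exact this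
  have c16315 : IsCoprime (16:Int) 315 := Int.isCoprime_iff_gcd_eq_one.mpr (by decide)
  have := c16315.mul_dvd h16 h315
  norm_num at this; exact this

theorem F_eq (a : Int) : F a = F_alt a := by
  have hmax : (PySem.List.max? ([10, 12, 14, 16, 18] : List Int) (fun y => y)) = some 18 := by
    rw [PySem.List.max?_id_cons]; norm_num [List.foldl]
  simp only [F, F_alt, List.foldl, hmax, Option.getD_some]
  simp
  by_cases h : (5040:Int) ∣ a
  · rw [if_pos h, if_pos ⟨dvd_trans (by norm_num) h, dvd_trans (by norm_num) h,
      dvd_trans (by norm_num) h, dvd_trans (by norm_num) h, dvd_trans (by norm_num) h⟩]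
  · rw [if_neg h, if_neg (fun hc => h (dvd_5040_of a hc.2.2.2.2 hc.2.2.1 hc.2.1 hc.1))]

-- ===== VERDICT (by name: the statement is the Claim_ definition above) =====
theorem F_spec : Claim_equal_F := by
  intro a _; exact F_eq a
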